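-- pv_equiv track=rewrite | github.com/elad014/GitHub-AI-Assistant | backend/services/github_service.py | _extract_file_hints
-- ===== SOURCE A (Python) =====
-- def _extract_file_hints(message: str, all_paths: list[str]) -> list[str]:
--     """Return paths from all_paths whose filename appears in the message."""
--     msg_lower = message.lower()
--     hints: list[str] = []
--     for path in all_paths:
--         filename = path.split("/")[-1].lower()
--         if filename and (filename in msg_lower or path.lower() in msg_lower):
--             hints.append(path)
--     return hints
-- ===== SOURCE B (Python) =====
-- def _extract_file_hints(message: str, all_paths: list[str]) -> list[str]:
--     # One substring search per DISTINCT filename (hash index), instead of up to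
--     # two searches per path.  The "path.lower() in message" check of the original
--     # is redundant: the filename is a substring of the path, so any message that
--     # contains the lowered path also contains the lowered filename.
--     msg_lower = message.lower()
--     names = dict.fromkeys(p.split("/")[-1].lower() for p in all_paths)
--     found = {fn: fn in msg_lower for fn in names if fn}
--     return [p for p in all_paths if found.get(p.split("/")[-1].lower(), False)]
-- ===== Notes on version B (the rewrite author's own statement) =====
-- stated objective: faster
-- what changed: B builds a dict of distinct filenames once and runs one substring search per distinct filename, dropping A's redundant 'path.lower() in message' scan (the lowered filename is always a substring of the lowered path), then filters the paths through that index.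
import Mathlib
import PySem

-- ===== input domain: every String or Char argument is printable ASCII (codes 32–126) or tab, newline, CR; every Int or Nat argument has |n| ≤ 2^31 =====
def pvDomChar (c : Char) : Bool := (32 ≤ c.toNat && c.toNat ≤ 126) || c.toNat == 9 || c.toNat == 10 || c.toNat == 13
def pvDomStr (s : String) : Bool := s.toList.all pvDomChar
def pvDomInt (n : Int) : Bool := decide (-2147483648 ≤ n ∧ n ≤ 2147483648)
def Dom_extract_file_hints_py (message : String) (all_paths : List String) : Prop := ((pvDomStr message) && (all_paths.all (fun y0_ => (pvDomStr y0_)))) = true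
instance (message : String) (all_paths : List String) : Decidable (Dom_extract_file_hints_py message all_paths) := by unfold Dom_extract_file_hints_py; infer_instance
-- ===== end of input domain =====

-- B replaces A's two substring searches per path by ONE search per DISTINCT filename
-- (a dict index built once), dropping A's redundant `path.lower() in msg` check
-- (the lowered filename is a substring of the lowered path).

-- Both Pythons compute `path.split("/")[-1].lower()` verbatim; shared helper.
-- split("/") never returns an empty list, so pyGet? … (-1) is always `some`
-- (lemma pvSplitOn_getLast below); `.getD []` is unreachable.
def pvFilename (path : String) : List Char :=
  PySem.Chars.lower ((PySem.List.pyGet? (PySem.Chars.splitOn path.toList ['/']) (-1)).getD [])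

-- ===== PORT A =====
def extract_file_hints_py (message : String) (all_paths : List String) : List String :=
  let msg_lower := PySem.Chars.lower message.toList
  all_paths.foldl (fun hints path =>
    let filename := pvFilename path
    if !filename.isEmpty && (PySem.Chars.isIn filename msg_lower
                             || PySem.Chars.isIn (PySem.Chars.lower path.toList) msg_lower)
    then hints ++ [path] else hints) []

-- ===== PORT B =====
def extract_file_hints_py_alt (message : String) (all_paths : List String) : List String :=
  let msg_lower := PySem.Chars.lower message.toList
  let names := PySem.List.dedup (all_paths.map pvFilename)
  let found : PySem.Dict (List Char) Bool :=
    names.foldl (fun d fn => if fn.isEmpty then d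
                             else d.insert fn (PySem.Chars.isIn fn msg_lower)) PySem.Dict.empty
  all_paths.filter (fun p => found.getD (pvFilename p) false)

-- ===== PRECONDITION & SPEC =====
def Spec_extract_file_hints_py (message : String) (all_paths : List String) (out : List String) : Prop := out = extract_file_hints_py_alt message all_paths
instance (message : String) (all_paths : List String) (out : List String) : Decidable (Spec_extract_file_hints_py message all_paths out) := by unfold Spec_extract_file_hints_py; infer_instance

-- ===== CLAIM (what is proved, stated in full; the proofs are below) =====
def Claim_equal_extract_file_hints_py : Prop := ∀ (message : String) (all_paths : List String), Dom_extract_file_hints_py message all_paths → Spec_extract_file_hints_py message all_paths (extract_file_hints_py message all_paths)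

-- ===== LEMMAS AND PROOFS =====

-- The last piece produced by split("/") is an infix of the input string.
lemma pvGo_getLast (sep : List Char) (fuel : Nat) :
    ∀ (l cur : List Char) (acc : List (List Char)),
      ∃ t, t <:+: (cur.reverse ++ l) ∧
        (PySem.Chars.splitOn.go sep fuel l cur acc).getLast? = some t := by
  induction fuel with
  | zero =>
      intro l cur acc
      exact ⟨cur.reverse ++ l, List.infix_refl _,
        by simp [PySem.Chars.splitOn.go, List.getLast?_reverse]⟩
  | succ fuel ih =>
      intro l cur acc
      cases l with
      | nil =>
          exact ⟨cur.reverse, by simp,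
            by simp [PySem.Chars.splitOn.go, List.getLast?_reverse]⟩
      | cons c rest =>
          by_cases h : sep.isPrefixOf (c :: rest) = true
          · obtain ⟨t, ht, hlast⟩ := ih (List.drop sep.length (c :: rest)) [] (cur.reverse :: acc)
            refine ⟨t, ?_, by simpa [PySem.Chars.splitOn.go, h] using hlast⟩
            simp only [List.reverse_nil, List.nil_append] at ht
            exact ht.trans ((List.drop_suffix _ _).isInfix.trans
              (List.suffix_append _ _).isInfix)
          · obtain ⟨t, ht, hlast⟩ := ih rest (c :: cur) acc
            refine ⟨t, ?_, by simpa [PySem.Chars.splitOn.go, h] using hlast⟩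
            simpa using ht

lemma pvSplitOn_getLast (s sep : List Char) :
    ∃ t, t <:+: s ∧ (PySem.Chars.splitOn s sep).getLast? = some t := by
  obtain ⟨t, ht, hlast⟩ := pvGo_getLast sep (s.length + 1) s [] []
  exact ⟨t, by simpa using ht, by simpa [PySem.Chars.splitOn] using hlast⟩

-- pyGet? xs (-1) is the last element.
lemma pvPyGet_neg_one {α : Type} (xs : List α) (h : xs ≠ []) :
    PySem.List.pyGet? xs (-1) = xs.getLast? := by
  have hl : 0 < xs.length := List.length_pos_iff.mpr h
  simp only [PySem.List.pyGet?, PySem.List.pyIdx?]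
  rw [if_neg (by omega), if_pos (by omega)]
  simp [List.getLast?_eq_getElem?]

-- the filename is an infix of the lowered path
lemma pvFilename_infix (path : String) :
    pvFilename path <:+: PySem.Chars.lower path.toList := by
  obtain ⟨t, ht, hlast⟩ := pvSplitOn_getLast path.toList ['/']
  have hne : PySem.Chars.splitOn path.toList ['/'] ≠ [] := by
    intro h; rw [h] at hlast; simp at hlast
  unfold pvFilename
  rw [pvPyGet_neg_one _ hne, hlast]
  simpa [PySem.Chars.lower] using List.IsInfix.map PySem.Chars.lowerChar ht

-- getD on the dict B builds
lemma pvGetD_found (msg : List Char) (names : List (List Char)) (k : List Char)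
    (d : PySem.Dict (List Char) Bool) :
    (names.foldl (fun d fn => if fn.isEmpty then d
                              else d.insert fn (PySem.Chars.isIn fn msg)) d).getD k false =
      if k ∈ names ∧ ¬ k.isEmpty = true then PySem.Chars.isIn k msg else d.getD k false := by
  induction names generalizing d with
  | nil => simp
  | cons fn rest ih =>
      simp only [List.foldl_cons]
      by_cases hfn : fn.isEmpty = true
      · rw [if_pos hfn, ih]
        by_cases hk : k = fn
        · subst hk; simp [hfn]
        · simp [hk]
      · rw [if_neg hfn, ih]
        by_cases hk : k = fn
        · subst hk; simp [hfn]
        · simp [hk, PySem.Dict.getD_insert]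

-- ===== VERDICT (by name: the statement is the Claim_ definition above) =====
theorem extract_file_hints_py_spec : Claim_equal_extract_file_hints_py := by
  intro message all_paths _
  unfold Spec_extract_file_hints_py extract_file_hints_py extract_file_hints_py_alt
  simp only []
  rw [show (fun (hints : List String) (path : String) =>
        if !(pvFilename path).isEmpty && (PySem.Chars.isIn (pvFilename path) (PySem.Chars.lower message.toList)
              || PySem.Chars.isIn (PySem.Chars.lower path.toList) (PySem.Chars.lower message.toList))
        then hints ++ [path] else hints) =
      (fun hints path => if (fun p => !(pvFilename p).isEmpty &&
            (PySem.Chars.isIn (pvFilename p) (PySem.Chars.lower message.toList)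
              || PySem.Chars.isIn (PySem.Chars.lower p.toList) (PySem.Chars.lower message.toList))) path
        then hints ++ [(fun x => x) path] else hints) from rfl,
    PySem.List.foldl_append_if, List.map_id']
  simp only [List.nil_append]
  apply List.filter_congr
  intro p hp
  rw [pvGetD_found, PySem.Dict.getD_empty]
  have hmem : pvFilename p ∈ PySem.List.dedup (all_paths.map pvFilename) :=
    (PySem.List.mem_dedup _ _).mpr (List.mem_map_of_mem hp)
  by_cases hfn : (pvFilename p).isEmpty = true
  · simp [hfn]
  · rw [if_pos ⟨hmem, hfn⟩]
    simp only [hfn, Bool.not_false, Bool.true_and]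
    by_cases h1 : PySem.Chars.isIn (pvFilename p) (PySem.Chars.lower message.toList) = true
    · simp [h1]
    · simp only [h1, Bool.false_or]
      by_cases h2 : PySem.Chars.isIn (PySem.Chars.lower p.toList) (PySem.Chars.lower message.toList) = true
      · exfalso
        exact h1 ((PySem.Chars.isIn_iff_infix _ _).mpr
          ((pvFilename_infix p).trans ((PySem.Chars.isIn_iff_infix _ _).mp h2)))
      · simp [h2]
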